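-- pv_equiv track=rewrite | github.com/moemza/Practice1 | practice1/python_practice.py | find_exponent
-- ===== SOURCE A (Python) =====
-- def find_exponent(a, n):
--     """Create a program to find an integer exponent x such that a^x = n.
--
--     e.g. If user inputs: a=2 n=4
--
--     The program will return: x=2
--
--     Args:
--         a (int): The base int
--         n (_type_): The solution
--     """
--
--     if a <= 1 or n < 1:
--         return None
--
--     x = 0
--     total = 1 # anything to the exponent 0 = 1
--     while total < n:
--         x = x + 1
--         total = total * a
--     if total == n:
--         return x    # We found the exponent
--     else:
--         return None
-- ===== SOURCE B (Python) =====
-- def find_exponent(a, n):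
--     """Find an integer exponent x such that a^x = n, by factoring n downward."""
--     if a <= 1 or n < 1:
--         return None
--     m = n
--     count = 0
--     while m % a == 0:
--         m //= a
--         count += 1
--     return count if m == 1 else None
-- ===== Notes on version B (the rewrite author's own statement) =====
-- stated objective: alternative
-- what changed: B divides n down by a while divisible and counts the divisions, instead of A's multiply-up-from-1-and-compare loop; the traversal direction, loop condition and maintained state are all different.
import Mathlib
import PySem

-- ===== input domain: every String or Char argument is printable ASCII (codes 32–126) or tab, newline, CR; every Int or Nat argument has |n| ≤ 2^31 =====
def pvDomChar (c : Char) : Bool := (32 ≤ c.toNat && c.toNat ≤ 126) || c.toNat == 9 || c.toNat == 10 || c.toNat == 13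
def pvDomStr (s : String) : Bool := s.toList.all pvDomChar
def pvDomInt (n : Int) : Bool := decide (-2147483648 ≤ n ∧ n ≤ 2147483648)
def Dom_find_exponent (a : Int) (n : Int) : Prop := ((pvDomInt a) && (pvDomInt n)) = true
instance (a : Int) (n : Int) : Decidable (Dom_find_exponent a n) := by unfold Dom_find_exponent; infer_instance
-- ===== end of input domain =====

-- B replaces A's multiply-up-from-1-and-compare loop by dividing n down by a while
-- divisible and counting the divisions (alternative algorithm, same asymptotic cost).

-- ===== PORT A =====
-- A's while loop `while total < n: x += 1; total *= a`; the hypothesis arguments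
-- (2 ≤ a, 1 ≤ total) only justify termination, they carry no data.
def pvAloop (a n x total : Int) (ha : 2 ≤ a) (ht : 1 ≤ total) : Int × Int :=
  if h : total < n then
    pvAloop a n (x + 1) (total * a) ha (by nlinarith)
  else
    (x, total)
termination_by (n - total).toNat
decreasing_by
  have h1 : total + 1 ≤ total * a := by nlinarith
  omega

def find_exponent (a : Int) (n : Int) : Option Int :=
  if h : a ≤ 1 ∨ n < 1 then none
  else
    let r := pvAloop a n 0 1 (by omega) (by omega)
    if r.2 = n then some r.1 else none

-- ===== PORT B =====
-- B's while loop `while m % a == 0: m //= a; count += 1`; `%` and `//` via PySem.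
def pvBloop (a m count : Int) (ha : 2 ≤ a) (hm : 1 ≤ m) : Int × Int :=
  if h : PySem.Int.mod m a = 0 then
    pvBloop a (PySem.Int.floordiv m a) (count + 1) ha
      (by
        have hd : a ∣ m := (PySem.Int.mod_eq_zero_iff_dvd m a).mp h
        obtain ⟨k, hk⟩ := hd
        have hk1 : 1 ≤ k := by nlinarith
        have : PySem.Int.floordiv m a = k := by
          rw [PySem.Int.floordiv_eq_ediv_of_pos (by omega), hk]
          rw [Int.mul_ediv_cancel_left _ (by omega : a ≠ 0)]
        omega)
  else
    (m, count)
termination_by m.toNat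
decreasing_by
  have hd : a ∣ m := (PySem.Int.mod_eq_zero_iff_dvd m a).mp h
  obtain ⟨k, hk⟩ := hd
  have hk1 : 1 ≤ k := by nlinarith
  have hfd : PySem.Int.floordiv m a = k := by
    rw [PySem.Int.floordiv_eq_ediv_of_pos (by omega), hk]
    rw [Int.mul_ediv_cancel_left _ (by omega : a ≠ 0)]
  have : k < m := by nlinarith
  omega

def find_exponent_alt (a : Int) (n : Int) : Option Int :=
  if h : a ≤ 1 ∨ n < 1 then none
  else
    let r := pvBloop a n 0 (by omega) (by omega)
    if r.1 = 1 then some r.2 else none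

-- ===== PRECONDITION & SPEC =====
def Spec_find_exponent (a : Int) (n : Int) (out : Option Int) : Prop := out = find_exponent_alt a n
instance (a : Int) (n : Int) (out : Option Int) : Decidable (Spec_find_exponent a n out) := by unfold Spec_find_exponent; infer_instance

-- ===== CLAIM (what is proved, stated in full; the proofs are below) =====
def Claim_equal_find_exponent : Prop := ∀ (a : Int) (n : Int), Dom_find_exponent a n → Spec_find_exponent a n (find_exponent a n)

-- ===== LEMMAS AND PROOFS =====

theorem aloop_spec (a n x total : Int) (ha : 2 ≤ a) (ht : 1 ≤ total) :
    (n ≤ total ∧ pvAloop a n x total ha ht = (x, total)) ∨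
    (∃ k : ℕ, 1 ≤ k ∧
      pvAloop a n x total ha ht = (x + (k : Int), total * a ^ k) ∧
      total * a ^ (k - 1) < n ∧ n ≤ total * a ^ k) := by
  fun_induction pvAloop a n x total ha ht with
  | case1 x t ht h ih =>
    right
    rcases ih with ⟨h1, h2⟩ | ⟨k, hk1, heq, hlt, hle⟩
    · exact ⟨1, le_refl _, by simpa using h2, by simpa using h, by simpa using h1⟩
    · refine ⟨k + 1, by omega, ?_, ?_, ?_⟩
      · rw [heq, Prod.mk.injEq]
        refine ⟨by push_cast; ring, by rw [pow_succ]; ring⟩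
      · have : t * a ^ (k + 1 - 1) = t * a * a ^ (k - 1) := by
          rw [mul_assoc, ← pow_succ']
          congr 2
          omega
        rw [this]; exact hlt
      · rw [pow_succ]; nlinarith [hle]
  | case2 x t ht h =>
    left; exact ⟨by omega, rfl⟩

theorem bloop_spec (a m count : Int) (ha : 2 ≤ a) (hm : 1 ≤ m) :
    ∃ (j : ℕ) (m' : Int), pvBloop a m count ha hm = (m', count + (j : Int)) ∧
      m = m' * a ^ j ∧ ¬ a ∣ m' ∧ 1 ≤ m' := by
  fun_induction pvBloop a m count ha hm with
  | case1 m count hm h ih =>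
    obtain ⟨j, m', heq, hrep, hnd, hm'⟩ := ih
    refine ⟨j + 1, m', ?_, ?_, hnd, hm'⟩
    · rw [heq]; congr 1; push_cast; ring
    · have hd : a ∣ m := (PySem.Int.mod_eq_zero_iff_dvd m a).mp h
      obtain ⟨k, hk⟩ := hd
      have hfd : PySem.Int.floordiv m a = k := by
        rw [PySem.Int.floordiv_eq_ediv_of_pos (by omega), hk]
        rw [Int.mul_ediv_cancel_left _ (by omega : a ≠ 0)]
      rw [hfd] at hrep
      rw [hk, hrep, pow_succ]; ring
  | case2 m count hm h =>
    exact ⟨0, m, by simp, by simp, fun hd => h ((PySem.Int.mod_eq_zero_iff_dvd m a).mpr hd), hm⟩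

theorem find_exponent_spec : Claim_equal_find_exponent := by
  intro a n _
  unfold Spec_find_exponent find_exponent find_exponent_alt
  by_cases hg : a ≤ 1 ∨ n < 1
  · simp [hg]
  · rw [dif_neg hg, dif_neg hg]
    have ha : 2 ≤ a := by omega
    have hn : 1 ≤ n := by omega
    obtain ⟨j, m', hB, hrep, hnd, hm'⟩ := bloop_spec a n 0 (by omega) (by omega)
    have hpj : (1 : Int) ≤ a ^ j := one_le_pow₀ (by omega)
    rcases aloop_spec a n 0 1 (by omega) (by omega) with ⟨hle, hA⟩ | ⟨k, hk1, hA, hlt, hkle⟩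
    · -- n ≤ 1, so n = 1; both return some 0
      have hn1 : n = 1 := by omega
      have hm'1 : m' = 1 := by nlinarith
      have hj0 : j = 0 := by
        by_contra hj
        have h1 : a ≤ a ^ j := by
          calc a = a ^ 1 := (pow_one a).symm
          _ ≤ a ^ j := pow_le_pow_right₀ (by omega) (by omega)
        nlinarith
      rw [hA, hB]
      simp [hn1, hm'1, hj0]
    · rw [one_mul] at hlt hkle
      simp only [hA, hB, zero_add]
      by_cases hm1 : m' = 1
      · -- n = a ^ j is a power; both return the exponent
        have hnj : n = a ^ j := by rw [hrep, hm1, one_mul]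
        have hjle : a ^ j ≤ a ^ k := by rw [← hnj]; exact hkle
        have hklt : a ^ (k - 1) < a ^ j := by rw [← hnj]; exact hlt
        have h1 : j ≤ k := (pow_le_pow_iff_right₀ (show (1:Int) < a by omega)).mp hjle
        have h2 : k - 1 < j := (pow_lt_pow_iff_right₀ (show (1:Int) < a by omega)).mp hklt
        have hjk : j = k := by omega
        subst hjk
        simp [hm1, hnj]
      · -- m' ≥ 2 not a unit: n is not a power of a, both return none
        have hm2 : 2 ≤ m' := by omega
        have hne : a ^ k ≠ n := by
          intro hEq
          rw [hrep] at hEq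
          rcases le_or_gt k j with hkj | hjk
          · have : a ^ k ≤ a ^ j := pow_le_pow_right₀ (by omega) hkj
            nlinarith
          · have : a ^ k = a ^ j * a ^ (k - j) := by
              rw [← pow_add]; congr 1; omega
            rw [this] at hEq
            have hcancel : m' = a ^ (k - j) := by
              have hpos : (a : Int) ^ j ≠ 0 := by positivity
              have hEq' : a ^ (k - j) * a ^ j = m' * a ^ j := by linarith [hEq]
              exact (mul_right_cancel₀ hpos hEq').symm
            exact hnd (hcancel ▸ dvd_pow_self a (by omega))
        simp [hne, hm1]
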